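-- pv_equiv track=rewrite | github.com/rujirapongsn2/Softnix-Agentic-Agent | src/softnix_agentic_agent/agent/loop.py | _has_rm_targets
-- ===== SOURCE A (Python) =====
-- def _has_rm_targets(parts: list[str]) -> bool:
--     treat_as_target = False
--     for token in parts[1:]:
--         if token == "--":
--             treat_as_target = True
--             continue
--         if not treat_as_target and token.startswith("-"):
--             continue
--         return True
--     return False
-- ===== SOURCE B (Python) =====
-- def _has_rm_targets(parts: list[str]) -> bool:
--     args = parts[1:]
--     if "--" in args:
--         i = args.index("--")
--         return any(not t.startswith("-") for t in args[:i]) or len(args) > i + 1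
--     return any(not t.startswith("-") for t in args)
-- ===== Notes on version B (the rewrite author's own statement) =====
-- stated objective: alternative
-- what changed: Replaces the single early-return loop threading a treat_as_target flag with a locate-the-'--'-separator step followed by a segment-wise scan: non-flag token before the separator, or any token at all after it.
-- intended difference: On inputs whose arguments are only flags before a '--' that is followed by a non-empty run consisting solely of further '--' tokens (e.g. ['rm','--','--']), A returns False because its loop skips every '--' even after the separator, while B returns True: after '--' every token, including a literal '--', is an rm target, so B's value is the intended one. — e.g. on _has_rm_targets(["rm", "--", "--"]): A returns false, B returns true
import Mathlib
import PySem

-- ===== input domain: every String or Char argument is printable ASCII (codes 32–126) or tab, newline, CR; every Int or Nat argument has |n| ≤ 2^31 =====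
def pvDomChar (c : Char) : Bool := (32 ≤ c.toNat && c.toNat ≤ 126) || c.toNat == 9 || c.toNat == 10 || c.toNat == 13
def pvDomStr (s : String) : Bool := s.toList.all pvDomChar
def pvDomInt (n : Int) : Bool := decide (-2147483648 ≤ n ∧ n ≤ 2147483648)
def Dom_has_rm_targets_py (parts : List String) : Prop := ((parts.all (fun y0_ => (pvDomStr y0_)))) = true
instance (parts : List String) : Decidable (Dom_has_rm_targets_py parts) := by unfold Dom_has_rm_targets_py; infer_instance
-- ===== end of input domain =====

-- B locates the '--' separator and scans the two segments instead of threading a flag through one loop; on inputs where everything after the first '--' is more '--' tokens, B (intendedly) reports a target where A does not.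

-- ===== PORT A =====
-- the for-loop with early return, threading treat_as_target
def hasRmLoopA : List String → Bool → Bool
  | [], _ => false
  | t :: rest, flag =>
    if t = "--" then hasRmLoopA rest true
    else if !flag && t.startsWith "-" then hasRmLoopA rest flag
    else true

def has_rm_targets_py (parts : List String) : Bool :=
  hasRmLoopA (PySem.List.slice parts (some 1) none) false

-- ===== PORT B =====
def has_rm_targets_py_alt (parts : List String) : Bool :=
  let args := PySem.List.slice parts (some 1) none
  match PySem.List.index? args "--" with
  | some i =>
      (PySem.List.slice args none (some (i : Int))).any (fun t => !t.startsWith "-")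
      || decide (args.length > i + 1)
  | none => args.any (fun t => !t.startsWith "-")

-- ===== PRECONDITION & SPEC =====
-- On inputs whose arguments contain a '--' preceded only by flag-like tokens and followed by a non-empty run consisting solely of further '--' tokens, A returns False (it skips every '--', even after the separator) while B returns True; after '--' every token — including '--' itself — is an rm target, so B's value is the intended one.
def D_has_rm_targets_py (parts : List String) : Prop :=
  "--" ∈ parts.drop 1 ∧
  (((parts.drop 1).take ((parts.drop 1).idxOf "--")).all (fun t => t.startsWith "-")) = true ∧
  (parts.drop 1).drop ((parts.drop 1).idxOf "--" + 1) ≠ [] ∧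
  (((parts.drop 1).drop ((parts.drop 1).idxOf "--" + 1)).all (fun t => t = "--")) = true
instance (parts : List String) : Decidable (D_has_rm_targets_py parts) := by
  unfold D_has_rm_targets_py; infer_instance

def Spec_has_rm_targets_py (parts : List String) (out : Bool) : Prop :=
  ¬ D_has_rm_targets_py parts → out = has_rm_targets_py_alt parts
instance (parts : List String) (out : Bool) : Decidable (Spec_has_rm_targets_py parts out) := by unfold Spec_has_rm_targets_py; infer_instance

def pvDiffWitness_has_rm_targets_py : List String := ["rm", "--", "--"]
def pvDiffWitnessOut_has_rm_targets_py : Bool × Bool := (false, true)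

-- ===== CLAIM (what is proved, stated in full; the proofs are below) =====
def Claim_unchanged_has_rm_targets_py : Prop := ∀ (parts : List String), Dom_has_rm_targets_py parts → Spec_has_rm_targets_py parts (has_rm_targets_py parts)
def Claim_changed_has_rm_targets_py : Prop := Dom_has_rm_targets_py (pvDiffWitness_has_rm_targets_py) ∧ D_has_rm_targets_py (pvDiffWitness_has_rm_targets_py) ∧ has_rm_targets_py (pvDiffWitness_has_rm_targets_py) = pvDiffWitnessOut_has_rm_targets_py.1 ∧ has_rm_targets_py_alt (pvDiffWitness_has_rm_targets_py) = pvDiffWitnessOut_has_rm_targets_py.2 ∧ pvDiffWitnessOut_has_rm_targets_py.1 ≠ pvDiffWitnessOut_has_rm_targets_py.2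
def Claim_exact_has_rm_targets_py : Prop := ∀ (parts : List String), Dom_has_rm_targets_py parts → D_has_rm_targets_py parts → has_rm_targets_py parts ≠ has_rm_targets_py_alt parts

-- ===== LEMMAS AND PROOFS =====

theorem idxOf_of_idxOf? {α : Type} [BEq α] [LawfulBEq α] (l : List α) (a : α) (i : Nat)
    (h : l.idxOf? a = some i) : l.idxOf a = i := by
  induction l generalizing i with
  | nil => simp [List.idxOf?] at h
  | cons b t ih =>
    by_cases hb : b = a
    · subst hb; simp [List.idxOf?_cons, List.idxOf_cons] at h ⊢; omega
    · simp [List.idxOf?_cons, List.idxOf_cons, hb] at h ⊢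
      cases hj : t.idxOf? a with
      | none => rw [hj] at h; simp at h
      | some j => rw [hj] at h; simp at h; rw [ih j hj]; omega

theorem mem_of_idxOf? {α : Type} [BEq α] [LawfulBEq α] (l : List α) (a : α) (i : Nat)
    (h : l.idxOf? a = some i) : a ∈ l := by
  by_contra hm
  rw [List.idxOf?_eq_none_iff.mpr hm] at h
  simp at h

-- with the flag set, A's loop returns true iff some token differs from "--"
theorem hasRmLoopA_true (l : List String) : hasRmLoopA l true = l.any (fun t => t ≠ "--") := by
  induction l with
  | nil => simp [hasRmLoopA]
  | cons t rest ih =>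
    by_cases h : t = "--" <;> simp [hasRmLoopA, h, ih]

-- with the flag clear, A's loop splits at the first "--"
theorem hasRmLoopA_false (l : List String) :
    hasRmLoopA l false =
      (match l.idxOf? "--" with
       | some i => (l.take i).any (fun t => !t.startsWith "-")
                   || (l.drop (i + 1)).any (fun t => t ≠ "--")
       | none => l.any (fun t => !t.startsWith "-")) := by
  induction l with
  | nil => simp [hasRmLoopA]
  | cons t rest ih =>
    by_cases h : t = "--"
    · subst h
      simp [hasRmLoopA, hasRmLoopA_true, List.idxOf?_cons]
    · rw [show (t :: rest).idxOf? "--" = (rest.idxOf? "--").map (· + 1) by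
        simp [List.idxOf?_cons, h]]
      cases hidx : rest.idxOf? "--" with
      | none =>
        by_cases hs : t.startsWith "-" <;> simp [hasRmLoopA, h, hs, ih, hidx]
      | some i =>
        by_cases hs : t.startsWith "-" <;>
          simp [hasRmLoopA, h, hs, ih, hidx, List.take_succ_cons, List.drop_succ_cons]

-- B, rewritten over take/drop of parts.drop 1
theorem alt_eq (parts : List String) :
    has_rm_targets_py_alt parts =
      (match (parts.drop 1).idxOf? "--" with
       | some i => ((parts.drop 1).take i).any (fun t => !t.startsWith "-")
                   || decide ((parts.drop 1).length > i + 1)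
       | none => (parts.drop 1).any (fun t => !t.startsWith "-")) := by
  unfold has_rm_targets_py_alt
  have hsl : PySem.List.slice parts (some 1) none = parts.drop 1 := by
    have := PySem.List.slice_from_natCast parts 1; simpa using this
  simp only [hsl, PySem.List.index?_eq_idxOf?]
  cases hidx : (parts.drop 1).idxOf? "--" with
  | none => simp
  | some i =>
    have h1 : PySem.List.slice (parts.drop 1) none (some (i : Int)) = (parts.drop 1).take i :=
      PySem.List.slice_to_natCast ..
    simp [h1]

-- A in the same shape
theorem a_eq (parts : List String) :
    has_rm_targets_py parts =
      (match (parts.drop 1).idxOf? "--" with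
       | some i => ((parts.drop 1).take i).any (fun t => !t.startsWith "-")
                   || ((parts.drop 1).drop (i + 1)).any (fun t => t ≠ "--")
       | none => (parts.drop 1).any (fun t => !t.startsWith "-")) := by
  unfold has_rm_targets_py
  have hsl : PySem.List.slice parts (some 1) none = parts.drop 1 := by
    have := PySem.List.slice_from_natCast parts 1; simpa using this
  rw [hsl, hasRmLoopA_false]

theorem has_rm_targets_py_spec : Claim_unchanged_has_rm_targets_py := by
  intro parts _ hnD
  rw [a_eq, alt_eq]
  unfold D_has_rm_targets_py at hnD
  cases hidx : (parts.drop 1).idxOf? "--" with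
  | none => simp
  | some i =>
    have hmem : "--" ∈ parts.drop 1 := mem_of_idxOf? _ _ _ hidx
    have hi : (parts.drop 1).idxOf "--" = i := idxOf_of_idxOf? _ _ _ hidx
    rw [hi] at hnD
    show (((parts.drop 1).take i).any (fun t => !t.startsWith "-")
           || ((parts.drop 1).drop (i + 1)).any (fun t => t ≠ "--"))
         = (((parts.drop 1).take i).any (fun t => !t.startsWith "-")
           || decide ((parts.drop 1).length > i + 1))
    by_cases hne : ((parts.drop 1).drop (i + 1)).any (fun t => t ≠ "--") = true
    · rcases List.any_eq_true.mp hne with ⟨x, hx, _⟩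
      have hni : (parts.drop 1).drop (i + 1) ≠ [] := by
        intro h; rw [h] at hx; exact absurd hx (List.not_mem_nil)
      have hlen : (parts.drop 1).length > i + 1 := by
        by_contra hl
        exact hni (List.drop_eq_nil_of_le (by omega))
      rw [hne, decide_eq_true hlen]
    · have hall : ((parts.drop 1).drop (i + 1)).all (fun t => t = "--") = true := by
        rw [List.all_eq_true]
        intro x hx
        by_contra hne2
        exact hne (List.any_eq_true.mpr ⟨x, hx, by simpa using hne2⟩)
      by_cases hnil : (parts.drop 1).drop (i + 1) = []
      · have hlen : ¬ (parts.drop 1).length > i + 1 := by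
          have := List.drop_eq_nil_iff.mp hnil; omega
        rw [hnil, decide_eq_false hlen, List.any_nil]
      · have htake : ¬ (((parts.drop 1).take i).all (fun t => t.startsWith "-")) = true := by
          intro h; exact hnD ⟨hmem, h, hnil, hall⟩
        have hany : ((parts.drop 1).take i).any (fun t => !t.startsWith "-") = true := by
          rw [List.any_eq_true]
          rcases (by simpa [List.all_eq_true] using htake :
              ∃ x ∈ (parts.drop 1).take i, ¬ (x.startsWith "-") = true) with ⟨x, hx, hxs⟩
          exact ⟨x, hx, by simpa using hxs⟩
        rw [hany]
        simp

theorem has_rm_targets_py_changed : Claim_changed_has_rm_targets_py := by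
  unfold Claim_changed_has_rm_targets_py; decide

theorem has_rm_targets_py_tight : Claim_exact_has_rm_targets_py := by
  intro parts _ hD
  rw [a_eq, alt_eq]
  obtain ⟨hmem, htake, hnil, hall⟩ := hD
  cases hidx : (parts.drop 1).idxOf? "--" with
  | none => exact absurd hmem (List.idxOf?_eq_none_iff.mp hidx)
  | some i =>
    have hi : (parts.drop 1).idxOf "--" = i := idxOf_of_idxOf? _ _ _ hidx
    rw [hi] at htake hnil hall
    show (((parts.drop 1).take i).any (fun t => !t.startsWith "-")
           || ((parts.drop 1).drop (i + 1)).any (fun t => t ≠ "--"))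
         ≠ (((parts.drop 1).take i).any (fun t => !t.startsWith "-")
           || decide ((parts.drop 1).length > i + 1))
    have h1 : ((parts.drop 1).take i).any (fun t => !t.startsWith "-") = false := by
      rw [List.any_eq_false]
      intro x hx
      simpa using List.all_eq_true.mp htake x hx
    have h2 : ((parts.drop 1).drop (i + 1)).any (fun t => t ≠ "--") = false := by
      rw [List.any_eq_false]
      intro x hx
      simpa using List.all_eq_true.mp hall x hx
    have hlen : (parts.drop 1).length > i + 1 := by
      by_contra hl
      exact hnil (List.drop_eq_nil_of_le (by omega))
    rw [h1, h2, decide_eq_true hlen]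
    simp
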